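-- pv_equiv track=rewrite | github.com/kisom/aoc | 2018/07/steps.py | work_available
-- ===== SOURCE A (Python) =====
-- import copy
--
-- def mark_done(steps, name):
--     for step in steps.keys():
--         if name in steps[step]:
--             steps[step].remove(name)
--     return steps
--
-- def find_available(waiting, time):
--     return [worker for worker in  waiting if waiting[worker] <= time]
--
-- def next_task_sequenced(steps, assignments):
--     in_progress = list(assignments.values())
--     for step in sorted(steps.keys()):
--         if len(steps[step]) == 0 and not step in in_progress:
--             return step
--
-- def work_available(steps, assignment, waiting, time):
--     available = find_available(waiting, time)
--     if not available:
--         return False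
--     steps_copy = copy.deepcopy(steps)
--     assignment_copy = copy.deepcopy(assignment)
--     for worker in available:
--         if worker in assignment_copy:
--             step_copy = mark_done(steps_copy, assignment_copy[worker])
--             del(assignment_copy[worker])
--     next_step = next_task_sequenced(steps_copy, assignment_copy)
--     if next_step:
--         return True
--     return False
-- ===== SOURCE B (Python) =====
-- def work_available(steps, assignment, waiting, time):
--     if not any(t <= time for t in waiting.values()):
--         return False
--     finished = [s for w, s in assignment.items() if w in waiting and waiting[w] <= time]
--     busy = {s for w, s in assignment.items() if not (w in waiting and waiting[w] <= time)}
--     for step in sorted(steps):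
--         deps = steps[step]
--         if step not in busy and all(deps.count(d) <= finished.count(d) for d in deps):
--             return True
--     return False
-- ===== Notes on version B (the rewrite author's own statement) =====
-- stated objective: simpler
-- what changed: A deep-copies both dicts and simulates completion by mutation (removing each finished step name from every dependency list and deleting finished workers), then tests the found step for truthiness; B never copies or mutates: one pass over the assignment builds the list of finished step names and the set of busy ones, and a step is schedulable when each dependency's multiplicity is covered by the finished list.
-- intended difference: When a worker is available and the first schedulable step is named by the empty string, A returns False (bool('') is falsy so its 'if next_step:' misses the found step) while B returns True, the intended answer since a schedulable step exists. — e.g. on work_available([("", [])], [], [("w", 0)], 0): A returns false, B returns true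
import Mathlib
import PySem

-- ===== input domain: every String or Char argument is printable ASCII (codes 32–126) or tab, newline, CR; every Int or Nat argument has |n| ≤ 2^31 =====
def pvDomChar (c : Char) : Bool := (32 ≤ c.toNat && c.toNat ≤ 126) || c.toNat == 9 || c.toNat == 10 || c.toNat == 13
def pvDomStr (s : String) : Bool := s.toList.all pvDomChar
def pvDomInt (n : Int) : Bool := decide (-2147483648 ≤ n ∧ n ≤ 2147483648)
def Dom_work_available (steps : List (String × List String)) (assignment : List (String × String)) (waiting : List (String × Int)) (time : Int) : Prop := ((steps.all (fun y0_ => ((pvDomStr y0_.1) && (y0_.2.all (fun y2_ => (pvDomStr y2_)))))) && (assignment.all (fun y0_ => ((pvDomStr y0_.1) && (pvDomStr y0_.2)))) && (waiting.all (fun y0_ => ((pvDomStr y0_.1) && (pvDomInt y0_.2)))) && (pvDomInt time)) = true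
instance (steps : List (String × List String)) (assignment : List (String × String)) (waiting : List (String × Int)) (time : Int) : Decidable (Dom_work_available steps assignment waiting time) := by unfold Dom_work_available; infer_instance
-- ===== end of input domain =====

-- B replaces A's deepcopy-and-mutate simulation (remove each finished step name from every dependency
-- list, delete finished workers from a copied assignment) by read-only counting over the unchanged
-- inputs; on the degenerate corner where the schedulable step is named "" (see D_ below) B returns
-- True where A's truthiness test accidentally returns False.

-- ===== PORT A =====
def pvMarkDone (steps : PySem.Dict String (List String)) (name : String) : PySem.Dict String (List String) :=
  (PySem.Dict.keys steps).foldl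
    (fun d k =>
      let v := PySem.Dict.getD d k []
      if name ∈ v then PySem.Dict.insert d k ((PySem.List.remove? v name).getD v) else d)
    steps

def pvFindAvailable (waiting : PySem.Dict String Int) (time : Int) : List String :=
  (PySem.Dict.keys waiting).filter (fun w => decide (PySem.Dict.getD waiting w 0 ≤ time))

def pvNextTaskSequenced (steps : PySem.Dict String (List String)) (assignments : PySem.Dict String String) : Option String :=
  let inProgress := PySem.Dict.values assignments
  (PySem.List.sorted (PySem.Dict.keys steps) (fun s => s) false).find?
    (fun step => (PySem.Dict.getD steps step []).length == 0 && !(inProgress.contains step))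

def work_available (steps : List (String × List String)) (assignment : List (String × String)) (waiting : List (String × Int)) (time : Int) : Bool :=
  let available := pvFindAvailable (PySem.Dict.ofList waiting) time
  if available.isEmpty then false
  else
    let st := available.foldl
      (fun (p : PySem.Dict String (List String) × PySem.Dict String String) w =>
        if PySem.Dict.contains p.2 w then
          (pvMarkDone p.1 (PySem.Dict.getD p.2 w ""), PySem.Dict.erase p.2 w)
        else p)
      (PySem.Dict.ofList steps, PySem.Dict.ofList assignment)
    match pvNextTaskSequenced st.1 st.2 with
    | some s => s != ""          -- Python truthiness of the returned step name
    | none => false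

-- ===== PORT B =====
def work_available_alt (steps : List (String × List String)) (assignment : List (String × String)) (waiting : List (String × Int)) (time : Int) : Bool :=
  let wD := PySem.Dict.ofList waiting
  if !((PySem.Dict.values wD).any (fun t => decide (t ≤ time))) then false
  else
    let aD := PySem.Dict.ofList assignment
    let finished := (aD.items.filter (fun p => PySem.Dict.contains wD p.1 && decide (PySem.Dict.getD wD p.1 0 ≤ time))).map Prod.snd
    let busy := PySem.Set.ofList ((aD.items.filter (fun p => !(PySem.Dict.contains wD p.1 && decide (PySem.Dict.getD wD p.1 0 ≤ time)))).map Prod.snd)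
    let sD := PySem.Dict.ofList steps
    ((PySem.List.sorted (PySem.Dict.keys sD) (fun s => s) false).find?
      (fun step =>
        let deps := PySem.Dict.getD sD step []
        !(PySem.Set.contains busy step) && deps.all (fun d => decide (deps.count d ≤ finished.count d)))).isSome

-- ===== PRECONDITION & SPEC =====
-- When some worker is available and the first schedulable step is the one named by the EMPTY STRING,
-- A returns False (bool('') is falsy, so its 'if next_step:' misses the found step) while B returns
-- True, which is the intended answer: a schedulable step exists.
def D_work_available (steps : List (String × List String)) (assignment : List (String × String)) (waiting : List (String × Int)) (time : Int) : Prop :=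
  let avail := ((PySem.Dict.ofList waiting).items.filter fun q => decide (q.2 ≤ time)).map Prod.fst
  let asg := (PySem.Dict.ofList assignment).items
  let deps := PySem.Dict.getD (PySem.Dict.ofList steps) "" []
  avail ≠ [] ∧ "" ∈ steps.map Prod.fst ∧ (∀ p ∈ asg, p.1 ∉ avail → p.2 ≠ "") ∧
    (↑deps : Multiset String) ≤ ↑((asg.filter fun p => avail.contains p.1).map Prod.snd)
instance (steps : List (String × List String)) (assignment : List (String × String)) (waiting : List (String × Int)) (time : Int) : Decidable (D_work_available steps assignment waiting time) := by unfold D_work_available; infer_instance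

def Spec_work_available (steps : List (String × List String)) (assignment : List (String × String)) (waiting : List (String × Int)) (time : Int) (out : Bool) : Prop := ¬ D_work_available steps assignment waiting time → out = work_available_alt steps assignment waiting time
instance (steps : List (String × List String)) (assignment : List (String × String)) (waiting : List (String × Int)) (time : Int) (out : Bool) : Decidable (Spec_work_available steps assignment waiting time out) := by unfold Spec_work_available; infer_instance

def pvDiffWitness_work_available : (List (String × List String)) × (List (String × String)) × (List (String × Int)) × Int :=
  ([("", [])], [], [("w", 0)], 0)
def pvDiffWitnessOut_work_available : Bool × Bool := (false, true)

-- ===== CLAIM (what is proved, stated in full; the proofs are below) =====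
def Claim_unchanged_work_available : Prop := ∀ (steps : List (String × List String)) (assignment : List (String × String)) (waiting : List (String × Int)) (time : Int), Dom_work_available steps assignment waiting time → Spec_work_available steps assignment waiting time (work_available steps assignment waiting time)
def Claim_changed_work_available : Prop := Dom_work_available (pvDiffWitness_work_available.1) (pvDiffWitness_work_available.2.1) (pvDiffWitness_work_available.2.2.1) (pvDiffWitness_work_available.2.2.2) ∧ D_work_available (pvDiffWitness_work_available.1) (pvDiffWitness_work_available.2.1) (pvDiffWitness_work_available.2.2.1) (pvDiffWitness_work_available.2.2.2) ∧ work_available (pvDiffWitness_work_available.1) (pvDiffWitness_work_available.2.1) (pvDiffWitness_work_available.2.2.1) (pvDiffWitness_work_available.2.2.2) = pvDiffWitnessOut_work_available.1 ∧ work_available_alt (pvDiffWitness_work_available.1) (pvDiffWitness_work_available.2.1) (pvDiffWitness_work_available.2.2.1) (pvDiffWitness_work_available.2.2.2) = pvDiffWitnessOut_work_available.2 ∧ pvDiffWitnessOut_work_available.1 ≠ pvDiffWitnessOut_work_available.2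
def Claim_exact_work_available : Prop := ∀ (steps : List (String × List String)) (assignment : List (String × String)) (waiting : List (String × Int)) (time : Int), Dom_work_available steps assignment waiting time → D_work_available steps assignment waiting time → work_available steps assignment waiting time ≠ work_available_alt steps assignment waiting time

-- ===== LEMMAS AND PROOFS =====

-- worker w is available at `time` (the test both programs make); proof-side abbreviation
def pvQ (wD : PySem.Dict String Int) (time : Int) (w : String) : Bool :=
  PySem.Dict.contains wD w && decide (PySem.Dict.getD wD w 0 ≤ time)

-- getD across pvMarkDone's fold over an arbitrary duplicate-free key list
theorem pvMarkDone_fold_getD (name : String) (ks : List String)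
    (d : PySem.Dict String (List String)) (k : String) (hks : ks.Nodup) :
    PySem.Dict.getD
      (ks.foldl (fun d k =>
        let v := PySem.Dict.getD d k []
        if name ∈ v then PySem.Dict.insert d k ((PySem.List.remove? v name).getD v) else d) d) k []
      = if k ∈ ks then (PySem.Dict.getD d k []).erase name else PySem.Dict.getD d k [] := by
  induction ks generalizing d with
  | nil => simp
  | cons k0 ks ih =>
    rcases List.nodup_cons.mp hks with ⟨hk0, hks'⟩
    simp only [List.foldl_cons]
    set d' := (let v := PySem.Dict.getD d k0 []
      if name ∈ v then PySem.Dict.insert d k0 ((PySem.List.remove? v name).getD v) else d) with hd'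
    have hstep : ∀ x, PySem.Dict.getD d' x []
        = if x = k0 then (PySem.Dict.getD d k0 []).erase name else PySem.Dict.getD d x [] := by
      intro x
      rw [hd']
      simp only
      by_cases hm : name ∈ PySem.Dict.getD d k0 []
      · rw [if_pos hm, PySem.List.remove?_eq_some_erase _ _ hm]
        simp only [Option.getD_some]
        rw [PySem.Dict.getD_insert]
      · rw [if_neg hm]
        by_cases hx : x = k0
        · rw [if_pos hx, hx, List.erase_of_not_mem hm]
        · rw [if_neg hx]
    rw [ih d' hks']
    by_cases hx : k ∈ ks
    · have : k ≠ k0 := fun h => hk0 (h ▸ hx)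
      simp [hx, hstep, this]
    · by_cases hk : k = k0
      · simp [hstep, hk, hk0]
      · simp [hx, hstep, hk]

theorem pvMarkDone_fold_keys (name : String) (ks : List String)
    (d : PySem.Dict String (List String)) :
    PySem.Dict.keys (ks.foldl (fun d k =>
        let v := PySem.Dict.getD d k []
        if name ∈ v then PySem.Dict.insert d k ((PySem.List.remove? v name).getD v) else d) d)
      = PySem.Dict.keys d := by
  induction ks generalizing d with
  | nil => rfl
  | cons k0 ks ih =>
    simp only [List.foldl_cons]
    rw [ih]
    by_cases hm : name ∈ PySem.Dict.getD d k0 []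
    · simp only [hm, if_pos]
      apply PySem.Dict.keys_insert_of_contains
      by_contra hc
      have hc' : PySem.Dict.contains d k0 = false := by
        revert hc; cases PySem.Dict.contains d k0 <;> simp
      rw [PySem.Dict.getD_of_not_contains d _ hc'] at hm
      exact List.not_mem_nil hm
    · simp [hm]

theorem pvMarkDone_getD (d : PySem.Dict String (List String)) (name k : String)
    (h : (PySem.Dict.keys d).Nodup) :
    PySem.Dict.getD (pvMarkDone d name) k [] = (PySem.Dict.getD d k []).erase name := by
  rw [pvMarkDone, pvMarkDone_fold_getD name _ d k h]
  by_cases hk : k ∈ PySem.Dict.keys d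
  · simp [hk]
  · have : PySem.Dict.getD d k [] = [] := by
      apply PySem.Dict.getD_of_not_contains
      rw [← Bool.not_eq_true, PySem.Dict.contains_iff_mem_keys]; exact hk
    simp [hk, this]

theorem pvMarkDone_keys (d : PySem.Dict String (List String)) (name : String) :
    PySem.Dict.keys (pvMarkDone d name) = PySem.Dict.keys d :=
  pvMarkDone_fold_keys name (PySem.Dict.keys d) d

theorem pvErase_items {ν : Type} (d : PySem.Dict String ν) (k : String) :
    (PySem.Dict.erase d k).items = d.items.filter (fun p => !(p.1 == k)) := by
  simp [PySem.Dict.erase]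

theorem pvGet?_filter {ν : Type} (l : List (String × ν)) (q : String × ν → Bool) (k : String)
    (h : ∀ v, q (k, v) = true) :
    PySem.Dict.get? (PySem.Dict.mk (l.filter q)) k = PySem.Dict.get? (PySem.Dict.mk l) k := by
  simp only [PySem.Dict.get?]
  congr 1
  induction l with
  | nil => rfl
  | cons p ps ih =>
    by_cases hk : p.1 = k
    · have hq : q p = true := by rw [show p = (k, p.2) by rw [← hk]]; exact h p.2
      simp [hq, hk]
    · by_cases hq : q p = true
      · simp [hq, hk, ih]
      · simp only [List.filter_cons, hq]
        rw [show List.find? (fun p => p.1 == k) (p :: ps) = List.find? (fun p => p.1 == k) ps from by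
          simp [hk]]
        simp only [Bool.false_eq_true, if_false]
        exact ih

-- the invariant of A's worker loop: dependency lists lose one occurrence per finished step name,
-- the assignment dict loses exactly the available workers, the key list is unchanged
theorem pvFoldA_inv (rest : List String)
    (d1 : PySem.Dict String (List String)) (d2 : PySem.Dict String String)
    (hrest : rest.Nodup) (h1 : (PySem.Dict.keys d1).Nodup) :
    (∀ k, PySem.Dict.getD
        (rest.foldl (fun (p : PySem.Dict String (List String) × PySem.Dict String String) w =>
          if PySem.Dict.contains p.2 w then
            (pvMarkDone p.1 (PySem.Dict.getD p.2 w ""), PySem.Dict.erase p.2 w)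
          else p) (d1, d2)).1 k []
      = (PySem.Dict.getD d1 k []).diff (rest.filterMap (fun w => PySem.Dict.get? d2 w))) ∧
    ((rest.foldl (fun (p : PySem.Dict String (List String) × PySem.Dict String String) w =>
          if PySem.Dict.contains p.2 w then
            (pvMarkDone p.1 (PySem.Dict.getD p.2 w ""), PySem.Dict.erase p.2 w)
          else p) (d1, d2)).2.items
      = d2.items.filter (fun p => !(rest.contains p.1))) ∧
    (PySem.Dict.keys (rest.foldl (fun (p : PySem.Dict String (List String) × PySem.Dict String String) w =>
          if PySem.Dict.contains p.2 w then
            (pvMarkDone p.1 (PySem.Dict.getD p.2 w ""), PySem.Dict.erase p.2 w)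
          else p) (d1, d2)).1 = PySem.Dict.keys d1) := by
  induction rest generalizing d1 d2 with
  | nil => simp
  | cons w rest ih =>
    rcases List.nodup_cons.mp hrest with ⟨hw, hrest'⟩
    simp only [List.foldl_cons]
    by_cases hc : PySem.Dict.contains d2 w = true
    · rw [if_pos hc]
      obtain ⟨v, hv⟩ : ∃ v, PySem.Dict.get? d2 w = some v := by
        rcases hq : PySem.Dict.get? d2 w with _ | v
        · exfalso
          rw [PySem.Dict.get?_eq_none_iff_not_mem_keys] at hq
          rw [PySem.Dict.contains_iff_mem_keys] at hc
          exact hq hc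
        · exact ⟨v, rfl⟩
      have hgetD : PySem.Dict.getD d2 w "" = v := by
        rw [PySem.Dict.getD, hv]; rfl
      have h1' : (PySem.Dict.keys (pvMarkDone d1 (PySem.Dict.getD d2 w ""))).Nodup := by
        rw [pvMarkDone_keys]; exact h1
      obtain ⟨ihg, ihi, ihk⟩ := ih (pvMarkDone d1 (PySem.Dict.getD d2 w "")) (PySem.Dict.erase d2 w) hrest' h1'
      have hink : ∀ x ≠ w, PySem.Dict.get? (PySem.Dict.erase d2 w) x = PySem.Dict.get? d2 x := by
        intro x hx
        have : PySem.Dict.erase d2 w = PySem.Dict.mk (d2.items.filter (fun p => !(p.1 == w))) := by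
          apply PySem.Dict.ext; rw [pvErase_items]
        rw [this]
        have hxl : PySem.Dict.get? (PySem.Dict.mk d2.items) x = PySem.Dict.get? d2 x := by rfl
        rw [← hxl]
        apply pvGet?_filter
        intro v'; simp [hx]
      refine ⟨?_, ?_, ?_⟩
      · intro k
        rw [ihg k, pvMarkDone_getD _ _ _ h1, hgetD]
        have : rest.filterMap (fun x => PySem.Dict.get? (PySem.Dict.erase d2 w) x)
            = rest.filterMap (fun x => PySem.Dict.get? d2 x) := by
          apply List.filterMap_congr
          intro x hx
          exact hink x (fun h => hw (h ▸ hx))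
        rw [this, List.filterMap_cons, hv, List.diff_cons]
      · rw [ihi, pvErase_items, List.filter_filter]
        apply List.filter_congr
        intro p _
        by_cases hpw : p.1 = w <;> simp [hpw]
      · rw [ihk, pvMarkDone_keys]
    · rw [if_neg hc]
      obtain ⟨ihg, ihi, ihk⟩ := ih d1 d2 hrest' h1
      have hnone : PySem.Dict.get? d2 w = none := by
        rw [PySem.Dict.get?_eq_none_iff_not_mem_keys, ← PySem.Dict.contains_iff_mem_keys]
        simpa using hc
      have hnotmem : ∀ p ∈ d2.items, p.1 ≠ w := by
        intro p hp hpw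
        apply hc
        rw [PySem.Dict.contains_iff_mem_keys, ← hpw]
        exact List.mem_map_of_mem hp
      refine ⟨?_, ?_, ihk⟩
      · intro k
        rw [ihg k, List.filterMap_cons, hnone]
      · rw [ihi]
        apply List.filter_congr
        intro p hp
        simp [hnotmem p hp]

-- membership in A's available list is the pvQ test
theorem pvMem_available (waitingD : PySem.Dict String Int) (time : Int) (w : String) :
    w ∈ pvFindAvailable waitingD time ↔ pvQ waitingD time w = true := by
  simp [pvFindAvailable, pvQ, List.mem_filter, PySem.Dict.contains_iff_mem_keys]

theorem pvAvailable_nodup (waitingD : PySem.Dict String Int) (time : Int)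
    (h : (PySem.Dict.keys waitingD).Nodup) : (pvFindAvailable waitingD time).Nodup :=
  h.filter _

-- A's emptiness test on the available list is the negation of B's any-test on the waiting values
theorem pvAvailable_empty_iff (waitingD : PySem.Dict String Int) (time : Int)
    (h : (PySem.Dict.keys waitingD).Nodup) :
    (pvFindAvailable waitingD time).isEmpty
      = !((PySem.Dict.values waitingD).any (fun t => decide (t ≤ time))) := by
  rw [Bool.eq_iff_iff]
  simp only [pvFindAvailable, List.isEmpty_iff, List.filter_eq_nil_iff, Bool.not_eq_eq_eq_not,
    Bool.not_true, List.any_eq_false, PySem.Dict.values, List.mem_map, PySem.Dict.keys]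
  constructor
  · rintro hh t ⟨p, hp, rfl⟩
    have := hh p.1 ⟨p, hp, rfl⟩
    rw [PySem.Dict.getD_of_mem_items waitingD (k := p.1) (v := p.2) hp h] at this
    simpa using this
  · rintro hh w ⟨p, hp, rfl⟩
    rw [PySem.Dict.getD_of_mem_items waitingD (k := p.1) (v := p.2) hp h]
    simpa using hh p.2 ⟨p, hp, rfl⟩

-- two duplicate-free lists both containing every element satisfying p have the same countP
theorem pvCountP_nodup_eq {α : Type} [DecidableEq α] (l1 l2 : List α) (p : α → Bool)
    (h1 : l1.Nodup) (h2 : l2.Nodup) (h : ∀ x, p x = true → (x ∈ l1 ∧ x ∈ l2)) :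
    l1.countP p = l2.countP p := by
  rw [List.countP_eq_length_filter, List.countP_eq_length_filter]
  apply List.Perm.length_eq
  apply List.perm_of_nodup_nodup_toFinset_eq (h1.filter p) (h2.filter p)
  ext x
  simp only [List.mem_toFinset, List.mem_filter]
  constructor
  · rintro ⟨hx, hp⟩; exact ⟨(h x hp).2, hp⟩
  · rintro ⟨hx, hp⟩; exact ⟨(h x hp).1, hp⟩

-- the multiset of step names A marks done equals B's list of finished step names
theorem pvMarks_count (waitingD : PySem.Dict String Int) (aD : PySem.Dict String String)
    (time : Int) (d : String)
    (hw : (PySem.Dict.keys waitingD).Nodup) (ha : (PySem.Dict.keys aD).Nodup) :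
    ((pvFindAvailable waitingD time).filterMap (fun w => PySem.Dict.get? aD w)).count d
      = ((aD.items.filter (fun p => pvQ waitingD time p.1)).map Prod.snd).count d := by
  rw [List.count_filterMap]
  have hR : ((aD.items.filter (fun p => pvQ waitingD time p.1)).map Prod.snd).count d
      = aD.items.countP (fun p => pvQ waitingD time p.1 && (p.2 == d)) := by
    simp only [List.count, List.countP_map, List.countP_filter]
    congr 1
    funext p
    rw [Bool.and_comm]
    rfl
  rw [hR]
  rw [pvFindAvailable, List.countP_filter]
  have step1 : List.countP (fun w => (PySem.Dict.get? aD w == some d) && decide (PySem.Dict.getD waitingD w 0 ≤ time)) (PySem.Dict.keys waitingD)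
      = List.countP (fun w => pvQ waitingD time w && (PySem.Dict.get? aD w == some d)) (PySem.Dict.keys waitingD) := by
    apply List.countP_congr
    intro w hwk
    have : PySem.Dict.contains waitingD w = true := (PySem.Dict.contains_iff_mem_keys _ _).mpr hwk
    simp [pvQ, this, Bool.and_comm]
  rw [step1]
  have step2 : List.countP (fun w => pvQ waitingD time w && (PySem.Dict.get? aD w == some d)) (PySem.Dict.keys waitingD)
      = List.countP (fun w => pvQ waitingD time w && (PySem.Dict.get? aD w == some d)) (PySem.Dict.keys aD) := by
    apply pvCountP_nodup_eq _ _ _ hw ha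
    intro x hx
    rcases (Bool.and_eq_true _ _).mp hx with ⟨hx1, hx2⟩
    constructor
    · rw [← PySem.Dict.contains_iff_mem_keys]
      have := (Bool.and_eq_true _ _).mp (show (PySem.Dict.contains waitingD x && decide (PySem.Dict.getD waitingD x 0 ≤ time)) = true from hx1)
      exact this.1
    · by_contra hmem
      rw [← PySem.Dict.get?_eq_none_iff_not_mem_keys] at hmem
      rw [hmem] at hx2
      simp at hx2
  rw [step2]
  have : PySem.Dict.keys aD = aD.items.map Prod.fst := rfl
  rw [this, List.countP_map]
  apply List.countP_congr
  intro p hp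
  have hg : PySem.Dict.get? aD p.1 = some p.2 := by
    apply PySem.Dict.get?_of_mem_items
    · exact (show (p.1, p.2) ∈ aD.items by simpa using hp)
    · exact ha
  simp only [Function.comp, hg]
  by_cases hv : pvQ waitingD time p.1 = true <;> simp [hv]

-- multiset characterisation of "every occurrence got removed"
theorem pvDiff_eq_nil_iff {α : Type} [DecidableEq α] (xs ys : List α) :
    xs.diff ys = [] ↔ ∀ d ∈ xs, xs.count d ≤ ys.count d := by
  have h0 : xs.diff ys = [] ↔ (↑xs - ↑ys : Multiset α) = 0 := by
    rw [Multiset.coe_sub]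
    exact ⟨fun h => by simp [h], fun h => by simpa using h⟩
  rw [h0, tsub_eq_zero_iff_le, Multiset.le_iff_count]
  constructor
  · intro hh d _; simpa using hh d
  · intro hh d
    by_cases hd : d ∈ xs
    · simpa using hh d hd
    · simp [List.count_eq_zero_of_not_mem hd]

theorem pvFind?_congr {α : Type} (l : List α) (p q : α → Bool) (h : ∀ x ∈ l, p x = q x) :
    l.find? p = l.find? q := by
  induction l with
  | nil => rfl
  | cons x xs ih =>
    simp only [List.find?_cons]
    rw [h x (by simp)]
    cases q x
    · exact ih (fun y hy => h y (by simp [hy]))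
    · rfl

-- B's search predicate, named for the proofs (definitionally the lambda in work_available_alt)
def pvPredB (steps : List (String × List String)) (assignment : List (String × String)) (waiting : List (String × Int)) (time : Int) (step : String) : Bool :=
  let deps := PySem.Dict.getD (PySem.Dict.ofList steps) step []
  !(PySem.Set.contains (PySem.Set.ofList (((PySem.Dict.ofList assignment).items.filter (fun p => !(pvQ (PySem.Dict.ofList waiting) time p.1))).map Prod.snd)) step) &&
    deps.all (fun d => decide (deps.count d ≤ (((PySem.Dict.ofList assignment).items.filter (fun p => pvQ (PySem.Dict.ofList waiting) time p.1)).map Prod.snd).count d))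

def pvF (steps : List (String × List String)) (assignment : List (String × String)) (waiting : List (String × Int)) (time : Int) : Option String :=
  (PySem.List.sorted (PySem.Dict.keys (PySem.Dict.ofList steps)) (fun s => s) false).find?
    (pvPredB steps assignment waiting time)

-- B's port, read through pvF
theorem pvAltChar (steps : List (String × List String)) (assignment : List (String × String)) (waiting : List (String × Int)) (time : Int) :
    work_available_alt steps assignment waiting time
      = if !((PySem.Dict.values (PySem.Dict.ofList waiting)).any (fun t => decide (t ≤ time))) then false
        else (pvF steps assignment waiting time).isSome := rfl

-- A's port, read through pvF: with an available worker, A's search finds exactly what B's finds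
theorem pvAChar (steps : List (String × List String)) (assignment : List (String × String)) (waiting : List (String × Int)) (time : Int)
    (he : (pvFindAvailable (PySem.Dict.ofList waiting) time).isEmpty = false) :
    work_available steps assignment waiting time
      = match pvF steps assignment waiting time with
        | some s => s != ""
        | none => false := by
  rw [work_available]
  simp only [he, Bool.false_eq_true, if_false]
  set wD := PySem.Dict.ofList waiting with hwD
  set aD := PySem.Dict.ofList assignment with haD
  set sD := PySem.Dict.ofList steps with hsD
  have hw : (PySem.Dict.keys wD).Nodup := PySem.Dict.nodup_keys_ofList waiting
  have ha : (PySem.Dict.keys aD).Nodup := PySem.Dict.nodup_keys_ofList assignment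
  have hs : (PySem.Dict.keys sD).Nodup := PySem.Dict.nodup_keys_ofList steps
  set avail := pvFindAvailable wD time with havail
  obtain ⟨hA1, hA2, hA3⟩ := pvFoldA_inv avail sD aD (pvAvailable_nodup wD time hw) hs
  have hfind : pvNextTaskSequenced
      (avail.foldl (fun (p : PySem.Dict String (List String) × PySem.Dict String String) w =>
        if PySem.Dict.contains p.2 w then
          (pvMarkDone p.1 (PySem.Dict.getD p.2 w ""), PySem.Dict.erase p.2 w)
        else p) (sD, aD)).1
      (avail.foldl (fun (p : PySem.Dict String (List String) × PySem.Dict String String) w =>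
        if PySem.Dict.contains p.2 w then
          (pvMarkDone p.1 (PySem.Dict.getD p.2 w ""), PySem.Dict.erase p.2 w)
        else p) (sD, aD)).2
      = pvF steps assignment waiting time := by
    rw [pvNextTaskSequenced, pvF]
    rw [hA3]
    apply pvFind?_congr
    intro step _
    have hdeps := hA1 step
    have c1 : ((PySem.Dict.getD (avail.foldl (fun (p : PySem.Dict String (List String) × PySem.Dict String String) w =>
          if PySem.Dict.contains p.2 w then
            (pvMarkDone p.1 (PySem.Dict.getD p.2 w ""), PySem.Dict.erase p.2 w)
          else p) (sD, aD)).1 step []).length == 0)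
        = (PySem.Dict.getD sD step []).all (fun d => decide ((PySem.Dict.getD sD step []).count d
            ≤ ((aD.items.filter (fun p => pvQ wD time p.1)).map Prod.snd).count d)) := by
      rw [hdeps]
      rw [Bool.eq_iff_iff]
      simp only [beq_iff_eq, List.length_eq_zero_iff, List.all_eq_true, decide_eq_true_eq]
      rw [pvDiff_eq_nil_iff]
      constructor
      · intro h d hd
        rw [← pvMarks_count wD aD time d hw ha, ← havail]
        exact h d hd
      · intro h d hd
        have := h d hd
        rw [← pvMarks_count wD aD time d hw ha, ← havail] at this
        exact this
    have c2 : (PySem.Dict.values (avail.foldl (fun (p : PySem.Dict String (List String) × PySem.Dict String String) w =>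
          if PySem.Dict.contains p.2 w then
            (pvMarkDone p.1 (PySem.Dict.getD p.2 w ""), PySem.Dict.erase p.2 w)
          else p) (sD, aD)).2).contains step
        = PySem.Set.contains (PySem.Set.ofList ((aD.items.filter (fun p => !(pvQ wD time p.1))).map Prod.snd)) step := by
      rw [Bool.eq_iff_iff]
      rw [PySem.Set.contains_iff, PySem.Set.mem_ofList, List.contains_iff_mem]
      simp only [PySem.Dict.values, hA2, List.mem_map, List.mem_filter]
      constructor
      · rintro ⟨p, ⟨hp, hnp⟩, rfl⟩
        refine ⟨p, ⟨hp, ?_⟩, rfl⟩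
        rw [Bool.not_eq_eq_eq_not, Bool.not_true, ← Bool.not_eq_true, ← pvMem_available wD time p.1]
        intro hmem
        rw [← List.contains_iff_mem, ← havail] at hmem
        rw [hmem] at hnp
        simp at hnp
      · rintro ⟨p, ⟨hp, hnp⟩, rfl⟩
        refine ⟨p, ⟨hp, ?_⟩, rfl⟩
        rw [Bool.not_eq_eq_eq_not, Bool.not_true, ← Bool.not_eq_true, ← pvMem_available wD time p.1] at hnp
        rw [← List.contains_iff_mem, ← havail] at hnp
        revert hnp
        cases avail.contains p.1 <;> simp
    rw [c1, c2, Bool.and_comm]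
    rfl
  rw [hfind]

-- "" is the least string
theorem pvEmpty_le (s : String) : "" ≤ s := by
  by_contra h
  push Not at h
  exact List.not_lt_nil _ (String.lt_iff_toList_lt.mp h)

-- a sorted key list containing "" starts with ""
theorem pvSorted_head (ks : List String) (h : "" ∈ ks) :
    ∃ t, PySem.List.sorted ks (fun s => s) false = "" :: t := by
  rcases hs : PySem.List.sorted ks (fun s => s) false with _ | ⟨m, t⟩
  · exfalso
    have hm : "" ∈ PySem.List.sorted ks (fun s => s) false := (PySem.List.mem_sorted _ _ _ _).mpr h
    rw [hs] at hm
    exact List.not_mem_nil hm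
  · have hle := PySem.List.key_head_sorted_le (xs := ks) (key := fun s => s) hs "" h
    have : m = "" := le_antisymm hle (pvEmpty_le m)
    exact ⟨t, by rw [this]⟩

-- D_ is exactly: some worker is available and B's predicate accepts the step named ""
-- pvQ as membership in the available-worker list D_ is phrased with
theorem pvQ_iff_mem (wD : PySem.Dict String Int) (time : Int) (w : String)
    (hw : (PySem.Dict.keys wD).Nodup) :
    pvQ wD time w = true ↔ w ∈ (wD.items.filter (fun q => decide (q.2 ≤ time))).map Prod.fst := by
  simp only [pvQ, Bool.and_eq_true, decide_eq_true_eq, List.mem_map, List.mem_filter]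
  constructor
  · rintro ⟨hc, hle⟩
    rcases hq : PySem.Dict.get? wD w with _ | v
    · exfalso
      rw [PySem.Dict.get?_eq_none_iff_not_mem_keys] at hq
      exact hq ((PySem.Dict.contains_iff_mem_keys _ _).mp hc)
    · have hmem := PySem.Dict.mem_items_of_get?_eq_some wD hq
      have hgd := PySem.Dict.getD_of_get?_eq_some wD (d0 := 0) hq
      exact ⟨(w, v), ⟨hmem, by rw [← hgd]; exact hle⟩, rfl⟩
  · rintro ⟨q, ⟨hq, hle⟩, rfl⟩
    have hgd : PySem.Dict.getD wD q.1 0 = q.2 :=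
      PySem.Dict.getD_of_mem_items wD (k := q.1) (v := q.2) (by simpa using hq) hw 0
    refine ⟨?_, by rw [hgd]; exact hle⟩
    rw [PySem.Dict.contains_iff_mem_keys]
    exact PySem.Dict.mem_keys_of_mem_items wD (by simpa using hq)

-- the keys of an ofList dict are the first occurrences of the pairs' first components
theorem pvKeys_ofList {ν : Type} (l : List (String × ν)) :
    PySem.Dict.keys (PySem.Dict.ofList l) = PySem.Set.ofList (l.map Prod.fst) := by
  rw [show PySem.Dict.ofList l = l.foldl (fun d p => PySem.Dict.insert d p.1 p.2) PySem.Dict.empty from rfl]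
  rw [PySem.Dict.keys_foldl_insert_key]
  rfl

-- D_ is exactly: some worker is available and B's predicate accepts the step named ""
theorem pvD_iff (steps : List (String × List String)) (assignment : List (String × String)) (waiting : List (String × Int)) (time : Int) :
    D_work_available steps assignment waiting time
      ↔ ((PySem.Dict.values (PySem.Dict.ofList waiting)).any (fun t => decide (t ≤ time)) = true) ∧
        PySem.Dict.contains (PySem.Dict.ofList steps) "" = true ∧
        pvPredB steps assignment waiting time "" = true := by
  rw [D_work_available]
  set wD := PySem.Dict.ofList waiting with hwD
  set aD := PySem.Dict.ofList assignment with haD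
  have hw : (PySem.Dict.keys wD).Nodup := PySem.Dict.nodup_keys_ofList waiting
  set avail := (wD.items.filter (fun q => decide (q.2 ≤ time))).map Prod.fst with havail
  have hQ : ∀ w, pvQ wD time w = true ↔ w ∈ avail := fun w => pvQ_iff_mem wD time w hw
  have c1 : (avail ≠ []) ↔ ((PySem.Dict.values wD).any (fun t => decide (t ≤ time)) = true) := by
    rw [havail]
    simp only [ne_eq, List.map_eq_nil_iff, List.filter_eq_nil_iff, not_forall,
      List.any_eq_true, PySem.Dict.values, List.mem_map]
    constructor
    · rintro ⟨q, hq, hle⟩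
      exact ⟨q.2, ⟨q, hq, rfl⟩, by simpa using hle⟩
    · rintro ⟨t, ⟨q, hq, rfl⟩, hle⟩
      exact ⟨q, hq, by simpa using hle⟩
  have c2 : ("" ∈ steps.map Prod.fst) ↔ PySem.Dict.contains (PySem.Dict.ofList steps) "" = true := by
    rw [PySem.Dict.contains_iff_mem_keys, pvKeys_ofList, PySem.Set.mem_ofList]
  have cfin : ((aD.items.filter (fun p => avail.contains p.1)).map Prod.snd)
      = ((aD.items.filter (fun p => pvQ wD time p.1)).map Prod.snd) := by
    congr 1
    apply List.filter_congr
    intro p _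
    rw [Bool.eq_iff_iff, List.contains_iff_mem, ← hQ]
  have hms : ((↑(PySem.Dict.getD (PySem.Dict.ofList steps) "" []) : Multiset String)
        ≤ ↑((aD.items.filter (fun p => avail.contains p.1)).map Prod.snd))
      ↔ (∀ d ∈ PySem.Dict.getD (PySem.Dict.ofList steps) "" [],
          (PySem.Dict.getD (PySem.Dict.ofList steps) "" []).count d
            ≤ ((aD.items.filter (fun p => avail.contains p.1)).map Prod.snd).count d) := by
    rw [Multiset.le_iff_count]
    constructor
    · intro h d _; simpa using h d
    · intro h d
      by_cases hd : d ∈ PySem.Dict.getD (PySem.Dict.ofList steps) "" []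
      · simpa using h d hd
      · simp [List.count_eq_zero_of_not_mem hd]
  have c4 : pvPredB steps assignment waiting time "" = true
      ↔ ((∀ p ∈ aD.items, p.1 ∉ avail → p.2 ≠ "") ∧
          ((↑(PySem.Dict.getD (PySem.Dict.ofList steps) "" []) : Multiset String)
            ≤ ↑((aD.items.filter (fun p => avail.contains p.1)).map Prod.snd))) := by
    rw [pvPredB, hms]
    simp only [Bool.and_eq_true, Bool.not_eq_true', List.all_eq_true, decide_eq_true_eq, cfin]
    constructor
    · rintro ⟨h3a, h3b⟩
      refine ⟨?_, h3b⟩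
      intro p hp hq hps
      rw [← Bool.not_eq_true, PySem.Set.contains_iff, PySem.Set.mem_ofList] at h3a
      apply h3a
      refine List.mem_map.mpr ⟨p, List.mem_filter.mpr ⟨hp, ?_⟩, hps⟩
      rw [Bool.not_eq_true', ← Bool.not_eq_true]
      exact fun hc => hq ((hQ p.1).mp hc)
    · rintro ⟨h3, h4⟩
      refine ⟨?_, h4⟩
      rw [← Bool.not_eq_true, PySem.Set.contains_iff, PySem.Set.mem_ofList]
      intro hmem
      rcases List.mem_map.mp hmem with ⟨p, hpf, hps⟩
      rcases List.mem_filter.mp hpf with ⟨hp, hq⟩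
      refine h3 p hp ?_ hps
      intro hc
      rw [Bool.not_eq_true'] at hq
      exact absurd ((hQ p.1).mpr hc) (by rw [hq]; exact Bool.false_ne_true)
  rw [c1, c2, c4]

-- under D_, the common search returns exactly the step named ""
theorem pvF_of_D (steps : List (String × List String)) (assignment : List (String × String)) (waiting : List (String × Int)) (time : Int)
    (h : D_work_available steps assignment waiting time) :
    pvF steps assignment waiting time = some "" := by
  obtain ⟨_, h2, h3⟩ := (pvD_iff steps assignment waiting time).mp h
  obtain ⟨t, ht⟩ := pvSorted_head (PySem.Dict.keys (PySem.Dict.ofList steps))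
    ((PySem.Dict.contains_iff_mem_keys _ _).mp h2)
  rw [pvF, ht, List.find?_cons_of_pos h3]

-- outside D_, the common search never returns the step named ""
theorem pvF_ne_empty_of_not_D (steps : List (String × List String)) (assignment : List (String × String)) (waiting : List (String × Int)) (time : Int)
    (hav : (PySem.Dict.values (PySem.Dict.ofList waiting)).any (fun t => decide (t ≤ time)) = true)
    (h : ¬ D_work_available steps assignment waiting time) :
    pvF steps assignment waiting time ≠ some "" := by
  intro hF
  apply h
  rw [pvD_iff]
  refine ⟨hav, ?_, List.find?_some hF⟩
  rw [PySem.Dict.contains_iff_mem_keys, ← PySem.List.mem_sorted (key := fun s => s) (rev := false)]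
  exact List.mem_of_find?_eq_some hF

-- ===== VERDICT (by name: the statements are the Claim_ definitions above) =====
theorem work_available_spec : Claim_unchanged_work_available := by
  intro steps assignment waiting time _ hD
  rw [pvAltChar]
  have hw : (PySem.Dict.keys (PySem.Dict.ofList waiting)).Nodup := PySem.Dict.nodup_keys_ofList waiting
  by_cases hav : (PySem.Dict.values (PySem.Dict.ofList waiting)).any (fun t => decide (t ≤ time)) = true
  · have he : (pvFindAvailable (PySem.Dict.ofList waiting) time).isEmpty = false := by
      rw [pvAvailable_empty_iff _ _ hw, hav]; rfl
    rw [pvAChar steps assignment waiting time he]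
    simp only [hav, Bool.not_true, Bool.false_eq_true, if_false]
    rcases hF : pvF steps assignment waiting time with _ | s
    · rfl
    · have hne : s ≠ "" := by
        intro hs
        exact pvF_ne_empty_of_not_D steps assignment waiting time hav hD (hs ▸ hF)
      simp [Option.isSome, hne]
  · have hav' : (PySem.Dict.values (PySem.Dict.ofList waiting)).any (fun t => decide (t ≤ time)) = false := by
      simpa using hav
    have he : (pvFindAvailable (PySem.Dict.ofList waiting) time).isEmpty = true := by
      rw [pvAvailable_empty_iff _ _ hw, hav']; rfl
    rw [work_available]
    simp [he, hav']

theorem work_available_changed : Claim_changed_work_available := by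
  unfold Claim_changed_work_available; decide

theorem work_available_tight : Claim_exact_work_available := by
  intro steps assignment waiting time _ hD
  have hav := ((pvD_iff steps assignment waiting time).mp hD).1
  have hw : (PySem.Dict.keys (PySem.Dict.ofList waiting)).Nodup := PySem.Dict.nodup_keys_ofList waiting
  have he : (pvFindAvailable (PySem.Dict.ofList waiting) time).isEmpty = false := by
    rw [pvAvailable_empty_iff _ _ hw, hav]; rfl
  have hF := pvF_of_D steps assignment waiting time hD
  rw [pvAChar steps assignment waiting time he, pvAltChar, hF]
  simp [hav]
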